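-- pv_equiv track=rewrite | github.com/ponty/electronic-measurements | elme/projects/swing/analyse.py | longest_good_interval
-- ===== SOURCE A (Python) =====
-- def longest_good_interval(ycol, limit):
--     good = [abs(y) < limit for y in ycol]
--
--     intervals = []
--     inside = False
--     for i, b in enumerate([False] + good + [False]):
--         i -= 1
--         if not inside:
--             r = [None, None]
--             if b:
--                 inside = True
--                 r[0] = i
--         if inside:
--             if not b:
--                 inside = False
--                 r[1] = i - 1
--                 intervals.append(r)
-- #    print intervals
--     intervals.sort(key=lambda r: r[1] - r[0], reverse=True)
--     if len(intervals):
--         return intervals[0]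
-- ===== SOURCE B (Python) =====
-- def longest_good_interval(ycol, limit):
--     best = None   # (start, end) of best interval seen so far, first max kept
--     start = None  # start of the current run of good values
--     for i, y in enumerate(ycol):
--         if abs(y) < limit:
--             if start is None:
--                 start = i
--             if best is None or i - start > best[1] - best[0]:
--                 best = (start, i)
--         else:
--             start = None
--     return list(best) if best is not None else None
-- ===== Notes on version B (the rewrite author's own statement) =====
-- stated objective: simpler
-- what changed: B replaces A's collect-all-good-intervals-then-stable-reverse-sort-and-take-head with a single left-to-right pass that tracks the current run start and keeps the first strictly-longest interval, so the intervals list and the sort disappear.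
import Mathlib
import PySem

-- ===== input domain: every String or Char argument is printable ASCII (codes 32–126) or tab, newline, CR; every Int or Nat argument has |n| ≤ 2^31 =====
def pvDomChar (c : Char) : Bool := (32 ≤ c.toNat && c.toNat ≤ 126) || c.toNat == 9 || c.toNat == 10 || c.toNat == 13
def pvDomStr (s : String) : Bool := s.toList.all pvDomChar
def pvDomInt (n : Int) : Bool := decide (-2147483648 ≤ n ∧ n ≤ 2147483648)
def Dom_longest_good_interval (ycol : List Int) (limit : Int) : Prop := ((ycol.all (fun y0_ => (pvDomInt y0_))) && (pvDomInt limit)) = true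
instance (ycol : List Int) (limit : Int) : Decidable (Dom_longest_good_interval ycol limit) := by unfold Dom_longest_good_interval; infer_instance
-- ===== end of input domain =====

-- B replaces A's collect-all-intervals-then-stable-sort with a single pass that keeps the
-- first longest run (strict >): same return value, no sort.

-- ===== PORT A =====
-- loop body; state (inside, r, intervals); r mirrors Python's r = [None, None].
-- At append time r[0] is always some (Python would raise otherwise); ported as .getD 0.
def pvStepA (st : Bool × (Option Int × Option Int) × List (Int × Int)) (ib : Int × Bool) :
    Bool × (Option Int × Option Int) × List (Int × Int) :=
  let i : Int := ib.1 - 1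
  let b : Bool := ib.2
  let (inside, r, intervals) := st
  -- if not inside: r = [None, None]; if b: inside = True; r[0] = i
  let (inside, r) :=
    if !inside then
      (if b then (true, ((some i : Option Int), (none : Option Int)))
       else (false, ((none : Option Int), (none : Option Int))))
    else (inside, r)
  -- if inside: if not b: inside = False; r[1] = i - 1; intervals.append(r)
  if inside && !b then
    (false, (r.1, some (i - 1)), intervals ++ [(r.1.getD 0, i - 1)])
  else (inside, r, intervals)

def longest_good_interval (ycol : List Int) (limit : Int) : Option (List Int) :=
  let good : List Bool := ycol.map (fun y => decide (|y| < limit))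
  let st := (PySem.List.enumerate ([false] ++ good ++ [false]) 0).foldl pvStepA
      (false, ((none : Option Int), (none : Option Int)), ([] : List (Int × Int)))
  let intervals := st.2.2
  -- intervals.sort(key=lambda r: r[1] - r[0], reverse=True); return intervals[0] if any
  match PySem.List.sorted intervals (fun r => r.2 - r.1) true with
  | [] => none
  | r :: _ => some [r.1, r.2]

-- ===== PORT B =====
-- loop body; state (best, start, i)
def pvStepB (limit : Int) (st : Option (Int × Int) × Option Int × Int) (y : Int) :
    Option (Int × Int) × Option Int × Int :=
  let (best, start, i) := st
  if |y| < limit then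
    let s := start.getD i
    let best' :=
      match best with
      | none => some (s, i)
      | some q => if i - s > q.2 - q.1 then some (s, i) else some q
    (best', some s, i + 1)
  else (best, none, i + 1)

def longest_good_interval_alt (ycol : List Int) (limit : Int) : Option (List Int) :=
  let st := ycol.foldl (pvStepB limit) (none, none, 0)
  st.1.map (fun p => [p.1, p.2])

-- ===== PRECONDITION & SPEC =====
def Spec_longest_good_interval (ycol : List Int) (limit : Int) (out : Option (List Int)) : Prop := out = longest_good_interval_alt ycol limit
instance (ycol : List Int) (limit : Int) (out : Option (List Int)) : Decidable (Spec_longest_good_interval ycol limit out) := by unfold Spec_longest_good_interval; infer_instance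

-- ===== CLAIM (what is proved, stated in full; the proofs are below) =====
def Claim_equal_longest_good_interval : Prop := ∀ (ycol : List Int) (limit : Int), Dom_longest_good_interval ycol limit → Spec_longest_good_interval ycol limit (longest_good_interval ycol limit)

-- ===== LEMMAS AND PROOFS =====

-- "first maximum" step: keep the incumbent unless the new interval is strictly longer
def pvFMstep (best : Option (Int × Int)) (p : Int × Int) : Option (Int × Int) :=
  match best with
  | none => some p
  | some q => if q.2 - q.1 < p.2 - p.1 then some p else some q

def pvOpen (k : Int) (start : Option Int) : List (Int × Int) :=
  match start with
  | none => []
  | some s => [(s, k - 1)]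

theorem pvInsertBy_head (x : Int × Int) (acc : List (Int × Int)) :
    (PySem.List.insertBy (fun a b : Int × Int => decide (b.2 - b.1 < a.2 - a.1)) x acc).head?
      = pvFMstep acc.head? x := by
  cases acc with
  | nil => simp [PySem.List.insertBy, pvFMstep]
  | cons y ys =>
      simp only [PySem.List.insertBy, pvFMstep, List.head?]
      split_ifs with h <;> simp_all

theorem pvSortedHead (l : List (Int × Int)) :
    (PySem.List.sorted l (fun r => r.2 - r.1) true).head? = List.foldl pvFMstep none l := by
  rw [PySem.List.sorted_rev_eq_foldl_insertBy]
  suffices h : ∀ (l : List (Int × Int)) (acc : List (Int × Int)),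
      (l.foldl (fun acc x => PySem.List.insertBy (fun a b : Int × Int => decide (b.2 - b.1 < a.2 - a.1)) x acc) acc).head?
        = l.foldl pvFMstep acc.head? by
    simpa using h l []
  intro l
  induction l with
  | nil => intro acc; rfl
  | cons x t ih =>
      intro acc
      simp only [List.foldl_cons, ih, pvInsertBy_head]

theorem pvFM_absorb (M : Option (Int × Int)) (s k : Int) :
    pvFMstep (pvFMstep M (s, k - 1)) (s, k) = pvFMstep M (s, k) := by
  cases M with
  | none =>
      have h3 : (k - 1) - s < k - s := by omega
      simp [pvFMstep, h3]
  | some q =>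
      by_cases h : q.2 - q.1 < (k - 1) - s
      · have h2 : q.2 - q.1 < k - s := by omega
        have h3 : (k - 1) - s < k - s := by omega
        simp [pvFMstep, h, h2, h3]
      · simp [pvFMstep, h]

theorem pvBstep_eq (best : Option (Int × Int)) (s i : Int) :
    (match best with
      | none => some (s, i)
      | some q => if i - s > q.2 - q.1 then some (s, i) else some q) = pvFMstep best (s, i) := by
  cases best <;> simp [pvFMstep, gt_iff_lt]

-- the coupled loop invariant: A's interval-collecting loop (over the rest of the column,
-- enumerate starting at k+1) and B's single pass (at position k) produce the same "first
-- longest" result, given that best summarises the closed intervals plus the open run.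
theorem pvCoupled (limit : Int) (ys : List Int) (k : Int) (r1 r2 : Option Int)
    (ivs : List (Int × Int)) (best : Option (Int × Int)) (start : Option Int)
    (hr : ∀ s, start = some s → r1 = some s)
    (h3 : List.foldl pvFMstep none (ivs ++ pvOpen k start) = best) :
    List.foldl pvFMstep none
      ((PySem.List.enumerate ((ys.map (fun y => decide (|y| < limit))) ++ [false]) (k + 1)).foldl
        pvStepA (start.isSome, (r1, r2), ivs)).2.2
      = (ys.foldl (pvStepB limit) (best, start, k)).1 := by
  induction ys generalizing k r1 r2 ivs best start with
  | nil =>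
      cases start with
      | none =>
          have step : pvStepA (false, (r1, r2), ivs) (k + 1, false)
              = (false, (none, none), ivs) := by
            simp [pvStepA]
          simpa [PySem.List.enumerate_cons, PySem.List.enumerate_nil, step, pvOpen] using h3
      | some s =>
          rw [hr s rfl]
          have step : pvStepA (true, ((some s : Option Int), r2), ivs) (k + 1, false)
              = (false, (some s, some (k - 1)), ivs ++ [(s, k - 1)]) := by
            simp [pvStepA]
          simp only [List.map_nil, List.nil_append, PySem.List.enumerate_cons,
            PySem.List.enumerate_nil, List.foldl_cons, List.foldl_nil, Option.isSome_some, step]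
          simpa [pvOpen] using h3
  | cons y t ih =>
      by_cases hg : |y| < limit
      · cases start with
        | none =>
            -- a run opens at position k
            have step : pvStepA (false, (r1, r2), ivs) (k + 1, true)
                = (true, (some k, none), ivs) := by
              simp [pvStepA, show (k : Int) + 1 - 1 = k from by omega]
            simp only [List.map_cons, hg, decide_true, List.cons_append,
              PySem.List.enumerate_cons, List.foldl_cons, Option.isSome_none, step,
              pvStepB, Option.getD_none, pvBstep_eq]
            refine ih (k + 1) (some k) none ivs (pvFMstep best (k, k)) (some k)
              (fun _ h => h) ?_
            simp only [pvOpen, List.foldl_append, List.foldl_nil, List.foldl_cons] at h3 ⊢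
            rw [h3, show (k : Int) + 1 - 1 = k from by omega]
        | some s =>
            -- the run continues
            rw [hr s rfl]
            have step : pvStepA (true, ((some s : Option Int), r2), ivs) (k + 1, true)
                = (true, (some s, r2), ivs) := by
              simp [pvStepA]
            simp only [List.map_cons, hg, decide_true, List.cons_append,
              PySem.List.enumerate_cons, List.foldl_cons, Option.isSome_some, step,
              pvStepB, Option.getD_some, pvBstep_eq]
            refine ih (k + 1) (some s) r2 ivs (pvFMstep best (s, k)) (some s)
              (fun _ h => h) ?_
            simp only [pvOpen, List.foldl_append, List.foldl_nil, List.foldl_cons] at h3 ⊢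
            rw [← h3, show (k : Int) + 1 - 1 = k from by omega, pvFM_absorb]
      · cases start with
        | none =>
            have step : pvStepA (false, (r1, r2), ivs) (k + 1, false)
                = (false, (none, none), ivs) := by
              simp [pvStepA]
            simp only [List.map_cons, decide_false, List.cons_append,
              PySem.List.enumerate_cons, List.foldl_cons, Option.isSome_none, step,
              pvStepB, hg, if_false]
            exact ih (k + 1) none none ivs best none (fun _ h => by cases h)
              (by simpa [pvOpen] using h3)
        | some s =>
            -- the run closes: interval (s, k-1) is appended
            rw [hr s rfl]
            have step : pvStepA (true, ((some s : Option Int), r2), ivs) (k + 1, false)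
                = (false, (some s, some (k - 1)), ivs ++ [(s, k - 1)]) := by
              simp [pvStepA]
            simp only [List.map_cons, decide_false, List.cons_append,
              PySem.List.enumerate_cons, List.foldl_cons, Option.isSome_some, step,
              pvStepB, hg, if_false]
            exact ih (k + 1) (some s) (some (k - 1)) (ivs ++ [(s, k - 1)]) best none
              (fun _ h => by cases h) (by simpa [pvOpen] using h3)

theorem pvMatchHead (L : List (Int × Int)) :
    (match L with
      | [] => (none : Option (List Int))
      | r :: _ => some [r.1, r.2]) = L.head?.map (fun p => [p.1, p.2]) := by
  cases L <;> rfl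

-- ===== VERDICT (by name: the statement is the Claim_ definition above) =====
theorem longest_good_interval_spec : Claim_equal_longest_good_interval := by
  intro ycol limit _
  unfold Spec_longest_good_interval longest_good_interval longest_good_interval_alt
  have step0 : pvStepA (false, ((none : Option Int), (none : Option Int)), ([] : List (Int × Int))) (0, false)
      = (false, (none, none), []) := by simp [pvStepA]
  have h := pvCoupled limit ycol 0 none none [] none none (fun _ h => by cases h)
    (by simp [pvOpen])
  simp only [List.cons_append, PySem.List.enumerate_cons, List.foldl_cons, step0,
    Option.isSome_none, zero_add, List.nil_append] at h ⊢
  rw [← h, pvMatchHead, pvSortedHead]
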